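-- pv_equiv track=rewrite | github.com/jacopo-minniti/process-uncertainty-models | rely/evaluate/goodhart.py | _format_steps_with_separator
-- ===== SOURCE A (Python) =====
-- def _format_steps_with_separator(steps: list[str], evaluate_n_steps: int = 1) -> str:
--     """
--     Mirror of rely.inference.sbs.servers._format_steps_with_separator
--     """
--     if not steps:
--         return "<extra_0>"
--     # If evaluating every step:
--     if evaluate_n_steps <= 1:
--         return "\n\n<extra_0>".join(steps) + "\n\n<extra_0>"
--
--     # Complex case if we were skipping steps
--     formatted_parts = []
--     steps_since_separator = 0
--     for idx, step in enumerate(steps, start=1):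
--         formatted_parts.append(step)
--         steps_since_separator += 1
--         if steps_since_separator == evaluate_n_steps:
--             formatted_parts.append("\n\n<extra_0>")
--             steps_since_separator = 0
--         elif idx != len(steps):
--             formatted_parts.append("\n\n")
--     if steps_since_separator > 0:
--         formatted_parts.append("\n\n<extra_0>")
--     return "".join(formatted_parts)
-- ===== SOURCE B (Python) =====
-- def _format_steps_with_separator(steps: list[str], evaluate_n_steps: int = 1) -> str:
--     if not steps:
--         return "<extra_0>"
--     n = evaluate_n_steps if evaluate_n_steps > 1 else 1
--     parts = []
--     i = 0
--     while i < len(steps):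
--         parts.append("\n\n".join(steps[i:i + n]) + "\n\n<extra_0>")
--         i += n
--     return "".join(parts)
-- ===== Notes on version B (the rewrite author's own statement) =====
-- stated objective: simpler
-- what changed: Replaces A's counter-driven single pass (with a last-index test and a separate trailing-partial-group flush) by clamping the step to n>=1 and looping over chunk start indices, emitting '\n\n'.join(steps[i:i+n]) + '\n\n<extra_0>' per chunk, which unifies A's two branches into one rule.
import Mathlib
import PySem

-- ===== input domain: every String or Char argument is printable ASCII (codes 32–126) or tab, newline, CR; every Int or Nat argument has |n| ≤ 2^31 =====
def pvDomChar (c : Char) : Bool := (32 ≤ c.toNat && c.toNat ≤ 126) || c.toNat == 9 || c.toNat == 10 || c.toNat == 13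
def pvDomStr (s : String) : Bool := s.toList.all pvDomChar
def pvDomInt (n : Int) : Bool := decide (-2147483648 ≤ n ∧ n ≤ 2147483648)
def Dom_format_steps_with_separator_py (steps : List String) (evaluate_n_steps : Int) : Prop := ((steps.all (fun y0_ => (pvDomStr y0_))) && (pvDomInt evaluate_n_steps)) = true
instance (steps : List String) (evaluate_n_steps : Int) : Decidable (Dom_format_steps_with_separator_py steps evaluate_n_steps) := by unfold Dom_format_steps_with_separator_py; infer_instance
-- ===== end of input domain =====

-- B replaces A's counter-driven single pass (with a separate trailing-partial-group flush) by a
-- simpler recursion that clamps the step to n ≥ 1 and emits one '\n\n'-joined chunk of n steps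
-- (plus '\n\n<extra_0>') at a time; objective: simpler, same cost.

-- ===== PORT A =====
-- body of A's for-loop: state = (formatted_parts, steps_since_separator), element = (idx, step)
def aStep (m L : Int) (st : List String × Int) (p : Int × String) : List String × Int :=
  let parts := st.1 ++ [p.2]
  let c := st.2 + 1
  if c = m then (parts ++ ["\n\n<extra_0>"], 0)
  else if p.1 ≠ L then (parts ++ ["\n\n"], c)
  else (parts, c)

def format_steps_with_separator_py (steps : List String) (evaluate_n_steps : Int) : String :=
  if steps = [] then "<extra_0>"
  else if evaluate_n_steps ≤ 1 then
    PySem.Str.join "\n\n<extra_0>" steps ++ "\n\n<extra_0>"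
  else
    let st := (PySem.List.enumerate steps 1).foldl (aStep evaluate_n_steps (steps.length : Int)) ([], 0)
    let parts := if st.2 > 0 then st.1 ++ ["\n\n<extra_0>"] else st.1
    PySem.Str.join "" parts

-- ===== PORT B =====
-- Source B's while-loop: i runs 0, n, 2n, ... (always >= 0, so i : Nat is exact); the chunk size
-- n >= 1 is passed as k + 1 (n = k + 1) so the index strictly advances; steps[i:i+n] is PySem.List.slice
def bWhile (steps : List String) (k : Nat) (i : Nat) (parts : List String) : List String :=
  if i < steps.length then
    bWhile steps k (i + (k + 1))
      (parts ++ [PySem.Str.join "\n\n"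
          (PySem.List.slice steps (some (i : Int)) (some ((i : Int) + ((k : Int) + 1)))) ++
        "\n\n<extra_0>"])
  else parts
termination_by steps.length - i
decreasing_by omega

def format_steps_with_separator_py_alt (steps : List String) (evaluate_n_steps : Int) : String :=
  if steps = [] then "<extra_0>"
  else
    let n := if evaluate_n_steps > 1 then evaluate_n_steps else 1
    PySem.Str.join "" (bWhile steps (n.toNat - 1) 0 [])

-- ===== PRECONDITION & SPEC =====
def Spec_format_steps_with_separator_py (steps : List String) (evaluate_n_steps : Int) (out : String) : Prop := out = format_steps_with_separator_py_alt steps evaluate_n_steps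
instance (steps : List String) (evaluate_n_steps : Int) (out : String) : Decidable (Spec_format_steps_with_separator_py steps evaluate_n_steps out) := by unfold Spec_format_steps_with_separator_py; infer_instance

-- ===== CLAIM (what is proved, stated in full; the proofs are below) =====
def Claim_equal_format_steps_with_separator_py : Prop := ∀ (steps : List String) (evaluate_n_steps : Int), Dom_format_steps_with_separator_py steps evaluate_n_steps → Spec_format_steps_with_separator_py steps evaluate_n_steps (format_steps_with_separator_py steps evaluate_n_steps)

-- ===== LEMMAS AND PROOFS =====

-- proof-layer view of B's loop: one chunk of k+1 steps at a time
def chunksGo (k : Nat) : List String → String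
  | [] => ""
  | x :: xs =>
      PySem.Str.join "\n\n" (x :: xs.take k) ++ "\n\n<extra_0>" ++ chunksGo k (xs.drop k)
termination_by l => l.length
decreasing_by simp


theorem sjoin_nil (sep : String) : PySem.Str.join sep [] = "" :=
  String.toList_inj.mp (by simp [PySem.Str.toList_join, PySem.Chars.join_nil])

theorem sjoin_singleton (sep p : String) : PySem.Str.join sep [p] = p :=
  String.toList_inj.mp (by simp [PySem.Str.toList_join, PySem.Chars.join_singleton])

theorem sjoin_cons_cons (sep p q : String) (rest : List String) :
    PySem.Str.join sep (p :: q :: rest) = p ++ sep ++ PySem.Str.join sep (q :: rest) :=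
  String.toList_inj.mp (by simp [PySem.Str.toList_join, PySem.Chars.join_cons_cons])

theorem sjoin0_cons (x : String) (t : List String) :
    PySem.Str.join "" (x :: t) = x ++ PySem.Str.join "" t := by
  cases t with
  | nil => simp [sjoin_singleton, sjoin_nil]
  | cons y ys => rw [sjoin_cons_cons]; simp

theorem sjoin0_append (p q : List String) :
    PySem.Str.join "" (p ++ q) = PySem.Str.join "" p ++ PySem.Str.join "" q := by
  induction p with
  | nil => simp [sjoin_nil]
  | cons x xs ih => simp [sjoin0_cons, ih, String.append_assoc]

-- A's loop, recast as a recursion over the remaining steps and the current counter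
-- (the final flush of a positive counter is folded into the [] case)
def gRec (m : Int) : List String → Int → String
  | [], c => if c > 0 then "\n\n<extra_0>" else ""
  | x :: xs, c =>
      if c + 1 = m then x ++ "\n\n<extra_0>" ++ gRec m xs 0
      else if xs = [] then x ++ gRec m [] (c + 1)
      else x ++ "\n\n" ++ gRec m xs (c + 1)
termination_by l _ => l.length
decreasing_by all_goals simp

theorem foldA (m L : Int) : ∀ (s : List String) (i : Int) (p : List String) (c : Int),
    0 ≤ c → i + (s.length : Int) = L + 1 →
    PySem.Str.join ""
      (if ((PySem.List.enumerate s i).foldl (aStep m L) (p, c)).2 > 0 then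
        ((PySem.List.enumerate s i).foldl (aStep m L) (p, c)).1 ++ ["\n\n<extra_0>"]
      else ((PySem.List.enumerate s i).foldl (aStep m L) (p, c)).1)
      = PySem.Str.join "" p ++ gRec m s c := by
  intro s
  induction s with
  | nil =>
      intro i p c hc _
      simp only [PySem.List.enumerate_nil, List.foldl_nil, gRec]
      by_cases h : c > 0 <;>
        simp [h, sjoin0_append, sjoin_singleton]
  | cons x xs ih =>
      intro i p c hc hlen
      simp only [List.length_cons] at hlen
      push_cast at hlen
      simp only [PySem.List.enumerate_cons, List.foldl_cons]
      by_cases hm : c + 1 = m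
      · have h1 : aStep m L (p, c) (i, x) = (p ++ [x] ++ ["\n\n<extra_0>"], 0) := by
          simp [aStep, hm]
        rw [h1, ih (i + 1) _ 0 le_rfl (by omega)]
        simp [gRec, hm, sjoin0_append, sjoin0_cons, sjoin_nil, String.append_assoc]
      · by_cases hxs : xs = []
        · have hiL : i = L := by subst hxs; simp at hlen; omega
          have h1 : aStep m L (p, c) (i, x) = (p ++ [x], c + 1) := by
            simp [aStep, hm, hiL]
          rw [h1, hxs]
          simp only [PySem.List.enumerate_nil, List.foldl_nil]
          have hpos : c + 1 > 0 := by omega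
          simp [hpos, gRec, hm, sjoin0_append, sjoin0_cons, sjoin_nil]
        · have hiL : i ≠ L := by
            have : (xs.length : Int) ≥ 1 := by
              cases xs with
              | nil => exact absurd rfl hxs
              | cons _ _ => push_cast [List.length_cons]; omega
            omega
          have h1 : aStep m L (p, c) (i, x) = (p ++ [x] ++ ["\n\n"], c + 1) := by
            simp [aStep, hm, hiL]
          rw [h1, ih (i + 1) _ (c + 1) (by omega) (by omega)]
          simp [gRec, hm, hxs, sjoin0_append, sjoin0_cons, sjoin_nil, String.append_assoc]

theorem gRec_chunk (m : Int) : ∀ (s : List String) (x : String) (c : Int),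
    0 ≤ c → c + 1 ≤ m →
    gRec m (x :: s) c =
      PySem.Str.join "\n\n" (x :: s.take ((m - c).toNat - 1)) ++ "\n\n<extra_0>" ++
        gRec m (s.drop ((m - c).toNat - 1)) 0 := by
  intro s
  induction s with
  | nil =>
      intro x c hc hcm
      by_cases h : c + 1 = m
      · rw [gRec, if_pos h]
        simp [gRec, sjoin_singleton]
      · rw [gRec, if_neg h, if_pos rfl]
        simp [gRec, sjoin_singleton, show c + 1 > 0 by omega]
  | cons y ys ih =>
      intro x c hc hcm
      by_cases h : c + 1 = m
      · have h0 : (m - c).toNat - 1 = 0 := by omega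
        rw [gRec, if_pos h, h0]
        simp [sjoin_singleton]
      · have hk : (m - c).toNat - 1 = ((m - (c + 1)).toNat - 1) + 1 := by omega
        rw [gRec, if_neg h, if_neg (by simp), ih y (c + 1) (by omega) (by omega), hk]
        simp [sjoin_cons_cons, String.append_assoc]

theorem gRec_eq_chunksGo (m : Int) (hm : 2 ≤ m) (s : List String) :
    gRec m s 0 = chunksGo (m.toNat - 1) s := by
  have key : ∀ (n : Nat) (s : List String), s.length ≤ n →
      gRec m s 0 = chunksGo (m.toNat - 1) s := by
    intro n
    induction n with
    | zero =>
        intro s hs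
        have hnil : s = [] := by cases s <;> simp_all
        subst hnil
        rw [chunksGo]
        simp [gRec]
    | succ n ihn =>
        intro s hs
        cases s with
        | nil => rw [chunksGo]; simp [gRec]
        | cons x xs =>
            rw [gRec_chunk m xs x 0 le_rfl (by omega)]
            rw [chunksGo]
            have hk : (m - 0).toNat - 1 = m.toNat - 1 := by omega
            rw [hk, ihn (xs.drop (m.toNat - 1)) (by simp at hs ⊢; omega)]
  exact key s.length s le_rfl

theorem sepjoin_eq_chunksGo0 : ∀ (xs : List String) (x : String),
    PySem.Str.join "\n\n<extra_0>" (x :: xs) ++ "\n\n<extra_0>" = chunksGo 0 (x :: xs) := by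
  intro xs
  induction xs with
  | nil =>
      intro x
      rw [chunksGo]
      simp [chunksGo, sjoin_singleton]
  | cons y ys ih =>
      intro x
      rw [sjoin_cons_cons, chunksGo]
      simp [sjoin_singleton, String.append_assoc, ← ih y]

theorem bWhile_join (k : Nat) (steps : List String) : ∀ (fuel i : Nat) (parts : List String),
    steps.length - i ≤ fuel →
    PySem.Str.join "" (bWhile steps k i parts) =
      PySem.Str.join "" parts ++ chunksGo k (steps.drop i) := by
  intro fuel
  induction fuel with
  | zero =>
      intro i parts h
      rw [bWhile, if_neg (by omega), List.drop_eq_nil_of_le (by omega), chunksGo]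
      simp
  | succ fuel ih =>
      intro i parts h
      by_cases hi : i < steps.length
      · rw [bWhile, if_pos hi, ih _ _ (by omega)]
        have hsl : PySem.List.slice steps (some (i : Int)) (some ((i : Int) + ((k : Int) + 1)))
            = (steps.drop i).take (k + 1) := by
          rw [PySem.List.slice_toNat steps (by positivity) (by positivity)]
          congr 1
          omega
        rw [hsl, List.drop_eq_getElem_cons hi, List.take_succ_cons, chunksGo]
        have hd : (steps.drop (i + 1)).drop k = steps.drop (i + (k + 1)) := by
          rw [List.drop_drop]
          congr 1
          omega
        rw [hd, sjoin0_append, sjoin_singleton]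
        simp [String.append_assoc]
      · rw [bWhile, if_neg hi, List.drop_eq_nil_of_le (by omega), chunksGo]
        simp

-- ===== VERDICT (by name: the statement is the Claim_ definition above) =====
theorem format_steps_with_separator_py_spec : Claim_equal_format_steps_with_separator_py := by
  intro steps m _
  unfold Spec_format_steps_with_separator_py
  unfold format_steps_with_separator_py format_steps_with_separator_py_alt
  cases steps with
  | nil => simp
  | cons x xs =>
      simp only [reduceCtorEq, ite_false]
      have hB : ∀ k : Nat, PySem.Str.join "" (bWhile (x :: xs) k 0 []) = chunksGo k (x :: xs) := by
        intro k
        rw [bWhile_join k (x :: xs) (x :: xs).length 0 [] (by omega)]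
        simp [sjoin_nil]
      by_cases hm : m ≤ 1
      · rw [if_pos hm]
        have hb : (if m > 1 then m else 1) = 1 := if_neg (by omega)
        rw [hb, hB]
        simpa using sepjoin_eq_chunksGo0 xs x
      · rw [if_neg hm]
        have hb : (if m > 1 then m else 1) = m := if_pos (by omega)
        rw [hb, hB]
        have hA := foldA m ((x :: xs).length : Int) (x :: xs) 1 [] 0 le_rfl (by ring)
        rw [hA, sjoin_nil, gRec_eq_chunksGo m (by omega)]
        simp
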